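-- pv_equiv track=rewrite | github.com/mhaselmann/advent-of-code | day10_syntax_scoring/answer.py | score_autocompletion
-- ===== SOURCE A (Python) =====
-- def score_autocompletion(non_closed_open_chars: list[str]) -> int:
--     score = 0
--     for c in reversed(non_closed_open_chars):
--         score *= 5
--         if c == "(":
--             score += 1
--         elif c == "[":
--             score += 2
--         elif c == "{":
--             score += 3
--         elif c == "<":
--             score += 4
--     return score
-- ===== SOURCE B (Python) =====
-- def score_autocompletion(non_closed_open_chars: list[str]) -> int:
--     values = {"(": 1, "[": 2, "{": 3, "<": 4}
--     total = 0
--     weight = 1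
--     for c in non_closed_open_chars:
--         total += values.get(c, 0) * weight
--         weight *= 5
--     return total
-- ===== Notes on version B (the rewrite author's own statement) =====
-- stated objective: alternative
-- what changed: Replaced the reversed-order Horner fold (score = score*5 + value via an if-chain) by a forward pass summing value(c) * weight with an explicitly maintained positional weight (powers of 5), the four values taken from a dict.
import Mathlib
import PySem

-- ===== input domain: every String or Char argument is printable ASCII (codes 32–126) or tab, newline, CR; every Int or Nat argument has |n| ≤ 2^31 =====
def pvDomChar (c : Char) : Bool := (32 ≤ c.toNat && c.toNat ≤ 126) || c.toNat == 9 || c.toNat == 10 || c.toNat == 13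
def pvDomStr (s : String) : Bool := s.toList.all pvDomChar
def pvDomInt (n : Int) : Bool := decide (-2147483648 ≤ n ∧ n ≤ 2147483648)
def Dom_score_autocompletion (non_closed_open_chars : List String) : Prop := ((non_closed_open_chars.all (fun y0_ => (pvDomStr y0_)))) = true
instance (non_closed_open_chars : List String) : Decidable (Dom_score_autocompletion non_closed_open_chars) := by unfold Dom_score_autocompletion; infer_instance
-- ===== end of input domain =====

-- B replaces A's reversed Horner fold by a forward positional weighted sum (value * 5^index); alternative decomposition, same cost.

-- ===== PORT A =====
-- literal port of A: fold over the reversed list, score *= 5 then the elif chain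
def score_autocompletion (non_closed_open_chars : List String) : Int :=
  non_closed_open_chars.reverse.foldl
    (fun score c =>
      let score := score * 5
      if c = "(" then score + 1
      else if c = "[" then score + 2
      else if c = "{" then score + 3
      else if c = "<" then score + 4
      else score) 0

-- ===== PORT B =====
-- literal port of Source B: dict of values, forward loop over the list carrying (total, weight)
def score_autocompletion_alt (non_closed_open_chars : List String) : Int :=
  let values : PySem.Dict String Int := PySem.Dict.ofList [("(", 1), ("[", 2), ("{", 3), ("<", 4)]
  (non_closed_open_chars.foldl
    (fun (p : Int × Int) c => (p.1 + (values.getD c 0) * p.2, p.2 * 5)) (0, 1)).1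

-- ===== PRECONDITION & SPEC =====
def Spec_score_autocompletion (non_closed_open_chars : List String) (out : Int) : Prop := out = score_autocompletion_alt non_closed_open_chars
instance (non_closed_open_chars : List String) (out : Int) : Decidable (Spec_score_autocompletion non_closed_open_chars out) := by unfold Spec_score_autocompletion; infer_instance

-- ===== CLAIM (what is proved, stated in full; the proofs are below) =====
def Claim_equal_score_autocompletion : Prop := ∀ (non_closed_open_chars : List String), Dom_score_autocompletion non_closed_open_chars → Spec_score_autocompletion non_closed_open_chars (score_autocompletion non_closed_open_chars)

-- ===== LEMMAS AND PROOFS =====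

-- reference value of one symbol
def pvVal (c : String) : Int :=
  if c = "(" then 1 else if c = "[" then 2 else if c = "{" then 3 else if c = "<" then 4 else 0

-- reference little-endian base-5 value: position i of xs weighs 5^i
def pvB0 : List String → Int
  | [] => 0
  | c :: xs => pvVal c + 5 * pvB0 xs

theorem pvA_step (s : Int) (c : String) :
    (let score := s * 5
     if c = "(" then score + 1
     else if c = "[" then score + 2
     else if c = "{" then score + 3
     else if c = "<" then score + 4
     else score) = s * 5 + pvVal c := by
  simp only [pvVal]; split_ifs <;> omega

theorem pvA_horner (xs : List String) (acc : Int) :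
    xs.reverse.foldl
      (fun score c =>
        let score := score * 5
        if c = "(" then score + 1
        else if c = "[" then score + 2
        else if c = "{" then score + 3
        else if c = "<" then score + 4
        else score) acc = acc * 5 ^ xs.length + pvB0 xs := by
  induction xs generalizing acc with
  | nil => simp [pvB0]
  | cons c xs ih =>
      rw [List.reverse_cons, List.foldl_append, ih]
      simp only [List.foldl_cons, List.foldl_nil, pvA_step, pvB0, List.length_cons, pow_succ]
      ring

theorem pvGetD_vals (c : String) :
    (PySem.Dict.ofList [("(", (1:Int)), ("[", 2), ("{", 3), ("<", 4)]).getD c 0 = pvVal c := by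
  have hitems : (PySem.Dict.ofList [("(", (1:Int)), ("[", 2), ("{", 3), ("<", 4)]).items
      = [("(", (1:Int)), ("[", 2), ("{", 3), ("<", 4)] := by decide
  simp only [PySem.Dict.getD, PySem.Dict.get?, hitems, List.find?]
  by_cases h1 : c = "("
  · subst h1; decide
  by_cases h2 : c = "["
  · subst h2; decide
  by_cases h3 : c = "{"
  · subst h3; decide
  by_cases h4 : c = "<"
  · subst h4; decide
  have g1 : ("(" == c) = false := beq_eq_false_iff_ne.mpr (fun h => h1 h.symm)
  have g2 : ("[" == c) = false := beq_eq_false_iff_ne.mpr (fun h => h2 h.symm)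
  have g3 : ("{" == c) = false := beq_eq_false_iff_ne.mpr (fun h => h3 h.symm)
  have g4 : ("<" == c) = false := beq_eq_false_iff_ne.mpr (fun h => h4 h.symm)
  simp [pvVal, h1, h2, h3, h4, g1, g2, g3, g4]

theorem pvB_sum (xs : List String) (t w : Int) :
    xs.foldl
      (fun (p : Int × Int) c =>
        (p.1 + ((PySem.Dict.ofList [("(", (1:Int)), ("[", 2), ("{", 3), ("<", 4)]).getD c 0) * p.2,
         p.2 * 5)) (t, w)
    = (t + w * pvB0 xs, w * 5 ^ xs.length) := by
  induction xs generalizing t w with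
  | nil => simp [pvB0]
  | cons c xs ih =>
      rw [List.foldl_cons, ih]
      simp only [pvGetD_vals, pvB0, List.length_cons]
      refine Prod.ext ?_ ?_ <;> simp <;> ring

-- ===== VERDICT (by name: the statement is the Claim_ definition above) =====
theorem score_autocompletion_spec : Claim_equal_score_autocompletion := by
  intro xs _
  show score_autocompletion xs = score_autocompletion_alt xs
  rw [score_autocompletion, score_autocompletion_alt, pvA_horner]
  simp only [pvB_sum xs 0 1]
  ring
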